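-- pv_equiv track=rewrite | github.com/hamzaish/RecycleBot | main.py | is_recyclable
-- ===== SOURCE A (Python) =====
-- recyclable_items = ["Tin", "Can", "Paper", "Aluminum", "Can", "Magazine", "Foil", "Carton", "Cardboard", "Book", "Box", "Letter", "Envelope", "Cup", "Text"]
--
-- trash_items = ["Food", "Bread", "Pizza", "Coffee", "Chips", "Chip", "Porcelain", "Coffee Cup", "Plastic Bag"]
--
-- def is_recyclable(labels):
--     recycle_labels = 0
--     trash_labels = 0
--     for label in labels:
--         if label in recyclable_items:
--             recycle_labels += 1
--         if label in trash_items: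
--             return "Trash"
--     if recycle_labels > 0:
--         return "Recycle"
--     else:
--         return "Trash"
-- ===== SOURCE B (Python) =====
-- recyclable_items = ["Tin", "Can", "Paper", "Aluminum", "Can", "Magazine", "Foil", "Carton", "Cardboard", "Book", "Box", "Letter", "Envelope", "Cup", "Text"]
--
-- trash_items = ["Food", "Bread", "Pizza", "Coffee", "Chips", "Chip", "Porcelain", "Coffee Cup", "Plastic Bag"]
--
-- def is_recyclable(labels):
--     labels = list(labels)
--     if any(l in trash_items for l in labels):
--         return "Trash"
--     if any(l in recyclable_items for l in labels):
--         return "Recycle"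
--     return "Trash"
-- ===== Notes on version B (the rewrite author's own statement) =====
-- stated objective: simpler
-- what changed: A's single counter-tracking loop with an early return is replaced by two independent membership scans (trash first, then recyclable) with no counters; correctness rests on the fact that a trash label anywhere forces 'Trash' regardless of the count accumulated so far.
import Mathlib
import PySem

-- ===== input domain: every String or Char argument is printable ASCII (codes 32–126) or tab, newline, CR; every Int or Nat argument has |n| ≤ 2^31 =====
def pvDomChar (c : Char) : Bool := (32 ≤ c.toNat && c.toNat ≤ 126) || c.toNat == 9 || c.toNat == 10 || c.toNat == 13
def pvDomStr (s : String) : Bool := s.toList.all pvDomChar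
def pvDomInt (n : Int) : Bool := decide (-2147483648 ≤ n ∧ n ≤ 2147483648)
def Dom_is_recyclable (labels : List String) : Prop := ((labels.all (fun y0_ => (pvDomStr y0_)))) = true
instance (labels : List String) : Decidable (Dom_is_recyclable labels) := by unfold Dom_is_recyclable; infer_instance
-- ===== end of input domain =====

-- ===== PORT A =====
-- B replaces A's counter loop by two independent any-membership scans; same result on all inputs.
def recyclable_items : List String := ["Tin", "Can", "Paper", "Aluminum", "Can", "Magazine", "Foil", "Carton", "Cardboard", "Book", "Box", "Letter", "Envelope", "Cup", "Text"]

def trash_items : List String := ["Food", "Bread", "Pizza", "Coffee", "Chips", "Chip", "Porcelain", "Coffee Cup", "Plastic Bag"]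

-- literal transliteration of A's loop: counters threaded through the recursion
def is_recyclable_loop (labels : List String) (recycle_labels trash_labels : Int) : String :=
  match labels with
  | [] => if recycle_labels > 0 then "Recycle" else "Trash"
  | label :: rest =>
      let recycle_labels' := if label ∈ recyclable_items then recycle_labels + 1 else recycle_labels
      if label ∈ trash_items then "Trash"
      else is_recyclable_loop rest recycle_labels' trash_labels

def is_recyclable (labels : List String) : String :=
  is_recyclable_loop labels 0 0

-- ===== PORT B =====
def is_recyclable_alt (labels : List String) : String :=
  if labels.any (fun l => l ∈ trash_items) then "Trash"
  else if labels.any (fun l => l ∈ recyclable_items) then "Recycle"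
  else "Trash"

-- ===== PRECONDITION & SPEC =====
def Spec_is_recyclable (labels : List String) (out : String) : Prop := out = is_recyclable_alt labels
instance (labels : List String) (out : String) : Decidable (Spec_is_recyclable labels out) := by unfold Spec_is_recyclable; infer_instance

-- ===== CLAIM (what is proved, stated in full; the proofs are below) =====
def Claim_equal_is_recyclable : Prop := ∀ (labels : List String), Dom_is_recyclable labels → Spec_is_recyclable labels (is_recyclable labels)

-- ===== LEMMAS AND PROOFS =====
lemma is_recyclable_loop_eq (labels : List String) (rc : Int) (hrc : 0 ≤ rc) (tc : Int) :
    is_recyclable_loop labels rc tc =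
      if labels.any (fun l => l ∈ trash_items) then "Trash"
      else if rc > 0 ∨ labels.any (fun l => l ∈ recyclable_items) then "Recycle"
      else "Trash" := by
  induction labels generalizing rc with
  | nil => simp [is_recyclable_loop]
  | cons l rest ih =>
      by_cases ht : l ∈ trash_items
      · simp [is_recyclable_loop, ht]
      · by_cases hr : l ∈ recyclable_items
        · rw [is_recyclable_loop]
          simp only [hr, ht, if_true, if_false]
          rw [ih (rc + 1) (by omega)]
          simp [ht, hr]
          split_ifs with h1 h2 <;> simp_all
        · rw [is_recyclable_loop]
          simp only [hr, ht, if_false]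
          rw [ih rc hrc]
          simp [ht, hr]

-- ===== VERDICT (by name: the statement is the Claim_ definition above) =====
theorem is_recyclable_spec : Claim_equal_is_recyclable := by
  intro labels _
  unfold Spec_is_recyclable is_recyclable is_recyclable_alt
  rw [is_recyclable_loop_eq labels 0 le_rfl 0]
  simp
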